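-- pv_equiv track=rewrite | github.com/ps251/i3-workspace-groups | i3wsgroups/workspace_names.py | get_lowest_free_local_numbers
-- ===== SOURCE A (Python) =====
-- from typing import Dict, List, Optional, Set
--
-- _MAX_WORKSPACES_PER_GROUP = 100
--
-- def get_lowest_free_local_numbers(num: int, used_local_numbers: Set[int]) -> List[int]:
--     local_numbers = []
--     for local_number in range(1, _MAX_WORKSPACES_PER_GROUP):
--         if len(local_numbers) == num:
--             break
--         if local_number in used_local_numbers:
--             continue
--         local_numbers.append(local_number)
--     assert len(local_numbers) == num
--     return local_numbers
-- ===== SOURCE B (Python) =====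
-- _MAX_WORKSPACES_PER_GROUP = 100
--
-- def get_lowest_free_local_numbers(num, used_local_numbers):
--     result = sorted(set(range(1, _MAX_WORKSPACES_PER_GROUP)) - set(used_local_numbers))[:num]
--     assert len(result) == num
--     return result
-- ===== Notes on version B (the rewrite author's own statement) =====
-- stated objective: simpler
-- what changed: Replaces the incremental scan-with-early-break that appends free numbers one at a time by materializing the whole set of free numbers via set difference, sorting it and slicing the first num.
import Mathlib
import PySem

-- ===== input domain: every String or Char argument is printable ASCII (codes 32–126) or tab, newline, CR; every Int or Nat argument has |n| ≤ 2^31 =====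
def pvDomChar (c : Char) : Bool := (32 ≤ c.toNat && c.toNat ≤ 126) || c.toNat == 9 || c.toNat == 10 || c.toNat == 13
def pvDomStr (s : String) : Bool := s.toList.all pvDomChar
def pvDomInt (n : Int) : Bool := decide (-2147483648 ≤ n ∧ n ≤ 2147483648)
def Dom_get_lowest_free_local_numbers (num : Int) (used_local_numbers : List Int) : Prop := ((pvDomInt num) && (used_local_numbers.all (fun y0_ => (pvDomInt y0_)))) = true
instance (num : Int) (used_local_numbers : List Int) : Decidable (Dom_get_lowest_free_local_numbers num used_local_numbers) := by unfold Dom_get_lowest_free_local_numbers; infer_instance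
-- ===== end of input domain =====

-- B computes the free numbers in one set difference, sorts and slices, instead of A's
-- element-by-element scan with an early break (objective: simpler).

-- ===== PORT A =====
-- the for-loop with its break/continue, state = local_numbers
def pvGoA (num : Int) (used : List Int) : List Int → List Int → List Int
  | [], acc => acc
  | x :: xs, acc =>
    if (acc.length : Int) = num then acc
    else if used.contains x then pvGoA num used xs acc
    else pvGoA num used xs (acc ++ [x])

def get_lowest_free_local_numbers (num : Int) (used_local_numbers : List Int) : List Int :=
  -- 'assert len(local_numbers) == num': inputs on which it fails are excluded by Pre_
  pvGoA num used_local_numbers (PySem.List.pyRange 1 100 1) []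

-- ===== PORT B =====
def get_lowest_free_local_numbers_alt (num : Int) (used_local_numbers : List Int) : List Int :=
  -- sorted(set(range(1, 100)) - set(used_local_numbers))[:num]; same assert, same Pre_
  PySem.List.slice
    (PySem.List.sorted
      (PySem.Set.diff (PySem.Set.ofList (PySem.List.pyRange 1 100 1)) used_local_numbers)
      (fun x => x) false)
    none (some num)

-- ===== PRECONDITION & SPEC =====
-- Pre_ excludes exactly the inputs on which both Pythons raise AssertionError:
-- num negative, or more numbers requested than are free in 1..99.
def Pre_get_lowest_free_local_numbers (num : Int) (used_local_numbers : List Int) : Prop :=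
  0 ≤ num ∧
  num ≤ (((PySem.List.pyRange 1 100 1).filter
            (fun x => !(used_local_numbers.contains x))).length : Int)
instance (num : Int) (used_local_numbers : List Int) : Decidable (Pre_get_lowest_free_local_numbers num used_local_numbers) := by unfold Pre_get_lowest_free_local_numbers; infer_instance

def pvWitness_get_lowest_free_local_numbers : Int × List Int := (2, [1, 3])

def Spec_get_lowest_free_local_numbers (num : Int) (used_local_numbers : List Int) (out : List Int) : Prop := out = get_lowest_free_local_numbers_alt num used_local_numbers
instance (num : Int) (used_local_numbers : List Int) (out : List Int) : Decidable (Spec_get_lowest_free_local_numbers num used_local_numbers out) := by unfold Spec_get_lowest_free_local_numbers; infer_instance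

-- ===== CLAIM (what is proved, stated in full; the proofs are below) =====
def Claim_equal_get_lowest_free_local_numbers : Prop := ∀ (num : Int) (used_local_numbers : List Int), Dom_get_lowest_free_local_numbers num used_local_numbers → Pre_get_lowest_free_local_numbers num used_local_numbers → Spec_get_lowest_free_local_numbers num used_local_numbers (get_lowest_free_local_numbers num used_local_numbers)

-- ===== LEMMAS AND PROOFS =====

-- the loop collects, after acc, the next (num - len acc) free numbers of l in order
theorem pvGoA_eq (num : Int) (used : List Int) (l : List Int) :
    ∀ acc : List Int, (acc.length : Int) ≤ num →
      pvGoA num used l acc =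
        acc ++ (l.filter (fun x => !(used.contains x))).take (num - acc.length).toNat := by
  induction l with
  | nil => intro acc _; simp [pvGoA]
  | cons x xs ih =>
    intro acc hle
    by_cases heq : (acc.length : Int) = num
    ·       simp [pvGoA, heq]
    · have hlt : (acc.length : Int) < num := lt_of_le_of_ne hle heq
      by_cases hx : x ∈ used
      · have hu : used.contains x = true := by simpa using hx
        simp [pvGoA, heq, ih acc hle, hx]
      · have hu : used.contains x = false := by simpa using hx
        have h1 : ((acc ++ [x]).length : Int) ≤ num := by simp; omega
        have h2 : (num - (acc.length : Int)).toNat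
            = (num - ((acc ++ [x]).length : Int)).toNat + 1 := by simp; omega
        simp only [pvGoA, if_neg heq, hu, Bool.false_eq_true, if_false, ih (acc ++ [x]) h1]
        simp [hx, h2]

theorem get_lowest_free_local_numbers_spec : Claim_equal_get_lowest_free_local_numbers := by
  intro num used _hdom hpre
  unfold Spec_get_lowest_free_local_numbers
  obtain ⟨h0, _hbound⟩ := hpre
  have hA : get_lowest_free_local_numbers num used
      = ((PySem.List.pyRange 1 100 1).filter (fun x => !(used.contains x))).take num.toNat := by
    unfold get_lowest_free_local_numbers
    rw [pvGoA_eq num used _ [] (by simpa using h0)]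
    simp
  have hnodup := PySem.List.nodup_pyRange_one 1 100
  have hofList : PySem.Set.ofList (PySem.List.pyRange 1 100 1) = PySem.List.pyRange 1 100 1 :=
    PySem.Set.ofList_eq_self_of_nodup _ hnodup
  have hdiff : PySem.Set.diff (PySem.Set.ofList (PySem.List.pyRange 1 100 1)) used
      = (PySem.List.pyRange 1 100 1).filter (fun x => !(used.contains x)) := by
    rw [hofList]; rfl
  have hpw : ((PySem.List.pyRange 1 100 1).filter (fun x => !(used.contains x))).Pairwise
      (fun a b : Int => (fun x => x) a ≤ (fun x => x) b) := by
    exact ((PySem.List.pairwise_lt_pyRange_one 1 100).filter _).imp (fun h => le_of_lt h)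
  have hsorted := PySem.List.sorted_eq_self_of_pairwise _ _ hpw
  unfold get_lowest_free_local_numbers_alt
  rw [hdiff, hsorted, PySem.List.slice_to _ h0, hA]
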